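-- pv_equiv track=rewrite | github.com/tobiasbritez/RPP_tobias_britez | funcion.py | calcular_totales
-- ===== SOURCE A (Python) =====
-- def calcular_totales(matriz, por_la_fila = True):
--     totales = []
--     if por_la_fila:
--         for fila in matriz:
--             total_fila = 0
--             for elemento in fila:
--                 total_fila += elemento
--                 totales.append(total_fila)
--     else:
--         columnas = len(matriz[0])
--         for j in range(columnas):
--             total_columna = 0
--             for i in range(len(matriz)):
--                 total_columna += matriz[i][j]
--             totales.append(total_columna)
--     return totales
-- ===== SOURCE B (Python) =====
-- def _prefijos(fila):
--     res = []
--     acum = 0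
--     for e in fila:
--         acum += e
--         res.append(acum)
--     return res
--
-- def calcular_totales(matriz, por_la_fila = True):
--     if por_la_fila:
--         return [p for fila in matriz for p in _prefijos(fila)]
--     tot = [0] * len(matriz[0])
--     for fila in matriz:
--         tot = [t + fila[j] for j, t in enumerate(tot)]
--     return tot
-- ===== Notes on version B (the rewrite author's own statement) =====
-- stated objective: alternative
-- what changed: Column branch keeps an array of running column sums updated row-major in one pass over the rows (rebuilding the array with an enumerate comprehension) instead of A's column-major nested index scans; row branch flattens per-row prefix-sum lists via a comprehension instead of appending inside nested loops.
import Mathlib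
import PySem

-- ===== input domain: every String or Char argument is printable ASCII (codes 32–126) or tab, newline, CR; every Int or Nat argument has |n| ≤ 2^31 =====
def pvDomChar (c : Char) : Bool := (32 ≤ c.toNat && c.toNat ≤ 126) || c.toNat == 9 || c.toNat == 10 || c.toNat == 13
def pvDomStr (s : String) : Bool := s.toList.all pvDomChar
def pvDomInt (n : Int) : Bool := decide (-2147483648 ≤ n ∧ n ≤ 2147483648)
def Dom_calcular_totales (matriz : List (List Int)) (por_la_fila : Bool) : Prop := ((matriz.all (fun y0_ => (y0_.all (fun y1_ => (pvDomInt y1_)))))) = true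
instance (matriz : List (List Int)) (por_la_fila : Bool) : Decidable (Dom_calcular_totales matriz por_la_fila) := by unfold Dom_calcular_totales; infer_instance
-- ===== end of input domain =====

-- B restructures both branches (row-major accumulator array for columns, flattened prefix lists for rows); same values, same cost.

-- ===== PORT A =====
def calcular_totales (matriz : List (List Int)) (por_la_fila : Bool) : List Int :=
  if por_la_fila then
    matriz.foldl (fun totales fila =>
      (fila.foldl (fun (st : Int × List Int) elemento =>
        (st.1 + elemento, st.2 ++ [st.1 + elemento])) (0, totales)).2) []
  else
    let columnas : Int := ((PySem.List.pyGetD matriz 0 []).length : Int)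
    (PySem.List.pyRange 0 columnas 1).foldl (fun totales j =>
      let total_columna := (PySem.List.pyRange 0 (matriz.length : Int) 1).foldl
        (fun tc i => tc + PySem.List.pyGetD (PySem.List.pyGetD matriz i []) j 0) 0
      totales ++ [total_columna]) []

-- ===== PORT B =====
-- helper _prefijos: running-sum loop with (res, acum) state
def prefijos (fila : List Int) : List Int :=
  (fila.foldl (fun (st : List Int × Int) e =>
    (st.1 ++ [st.2 + e], st.2 + e)) ([], 0)).1

def calcular_totales_alt (matriz : List (List Int)) (por_la_fila : Bool) : List Int :=
  if por_la_fila then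
    matriz.flatMap (fun fila => prefijos fila)
  else
    let tot : List Int := List.replicate (PySem.List.pyGetD matriz 0 []).length 0
    matriz.foldl (fun tot fila =>
      (PySem.List.enumerate tot).map (fun jt => jt.2 + PySem.List.pyGetD fila jt.1 0)) tot

-- ===== PRECONDITION & SPEC =====
-- Pre_ excludes exactly the inputs where Python A raises IndexError: the column branch
-- on an empty matrix (len(matriz[0])) or on a matrix with a row shorter than row 0.
def Pre_calcular_totales (matriz : List (List Int)) (por_la_fila : Bool) : Prop :=
  por_la_fila = true ∨ (matriz ≠ [] ∧ ∀ fila ∈ matriz, (matriz.headD []).length ≤ fila.length)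

instance (matriz : List (List Int)) (por_la_fila : Bool) : Decidable (Pre_calcular_totales matriz por_la_fila) := by
  unfold Pre_calcular_totales; infer_instance

def pvWitness_calcular_totales : List (List Int) × Bool := ([[1, 2], [3, 4]], false)

def Spec_calcular_totales (matriz : List (List Int)) (por_la_fila : Bool) (out : List Int) : Prop := out = calcular_totales_alt matriz por_la_fila
instance (matriz : List (List Int)) (por_la_fila : Bool) (out : List Int) : Decidable (Spec_calcular_totales matriz por_la_fila out) := by unfold Spec_calcular_totales; infer_instance

-- ===== CLAIM (what is proved, stated in full; the proofs are below) =====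
def Claim_equal_calcular_totales : Prop := ∀ (matriz : List (List Int)) (por_la_fila : Bool), Dom_calcular_totales matriz por_la_fila → Pre_calcular_totales matriz por_la_fila → Spec_calcular_totales matriz por_la_fila (calcular_totales matriz por_la_fila)

-- ===== LEMMAS AND PROOFS =====

-- B's prefix fold with arbitrary accumulated list factors the list out
theorem pref_fold_acc (fila : List Int) (r : List Int) (t : Int) :
    (fila.foldl (fun (st : List Int × Int) e => (st.1 ++ [st.2 + e], st.2 + e)) (r, t)).1
    = r ++ (fila.foldl (fun (st : List Int × Int) e => (st.1 ++ [st.2 + e], st.2 + e)) ([], t)).1 := by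
  induction fila generalizing r t with
  | nil => simp
  | cons e fs ih =>
    simp only [List.foldl_cons, List.nil_append]
    rw [ih (r ++ [t + e]) (t + e), ih [t + e] (t + e)]
    simp

-- A's inner row loop produces acc ++ prefijos fila (second component), shifted by t in general
theorem rowA_inner (fila : List Int) (t : Int) (acc : List Int) :
    (fila.foldl (fun (st : Int × List Int) e => (st.1 + e, st.2 ++ [st.1 + e])) (t, acc)).2
    = acc ++ (fila.foldl (fun (st : List Int × Int) e => (st.1 ++ [st.2 + e], st.2 + e)) ([], t)).1 := by
  induction fila generalizing t acc with
  | nil => simp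
  | cons e fs ih =>
    simp only [List.foldl_cons, List.nil_append]
    rw [ih (t + e) (acc ++ [t + e]), pref_fold_acc fs [t + e] (t + e)]
    simp

theorem rowA_eq (matriz : List (List Int)) (acc : List Int) :
    matriz.foldl (fun totales fila =>
      (fila.foldl (fun (st : Int × List Int) elemento =>
        (st.1 + elemento, st.2 ++ [st.1 + elemento])) (0, totales)).2) acc
    = acc ++ matriz.flatMap (fun fila => prefijos fila) := by
  induction matriz generalizing acc with
  | nil => simp
  | cons fila rest ih =>
    simp only [List.foldl_cons, List.flatMap_cons]
    rw [rowA_inner fila 0 acc, ih]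
    simp [prefijos]

-- column-sum as a foldl over rows, with init shifted out
theorem foldl_add_init (l : List (List Int)) (f : List Int → Int) (t : Int) :
    l.foldl (fun a r => a + f r) t = t + l.foldl (fun a r => a + f r) 0 := by
  induction l generalizing t with
  | nil => simp
  | cons r rs ih => simp only [List.foldl_cons]; rw [ih (t + f r), ih (0 + f r)]; ring

-- F rows j = sum over rows of row[j] (with default 0)
def Fcol (rows : List (List Int)) (j : Int) : Int :=
  rows.foldl (fun a r => a + PySem.List.pyGetD r j 0) 0

theorem Fcol_cons (r : List Int) (rs : List (List Int)) (j : Int) :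
    Fcol (r :: rs) j = PySem.List.pyGetD r j 0 + Fcol rs j := by
  simp only [Fcol, List.foldl_cons]
  rw [foldl_add_init rs _ (0 + PySem.List.pyGetD r j 0)]
  ring_nf

-- B's column step preserves length
theorem colStep_length (tot : List Int) (fila : List Int) :
    ((PySem.List.enumerate tot).map (fun jt => jt.2 + PySem.List.pyGetD fila jt.1 0)).length
      = tot.length := by
  simp [PySem.List.length_enumerate]

theorem colStep_get (tot : List Int) (fila : List Int) (k : Nat) (hk : k < tot.length) :
    ((PySem.List.enumerate tot).map (fun jt => jt.2 + PySem.List.pyGetD fila jt.1 0))[k]'(by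
      rw [colStep_length]; exact hk)
    = tot[k] + PySem.List.pyGetD fila (k : Int) 0 := by
  rw [List.getElem_map]
  rw [PySem.List.getElem_enumerate]
  simp

theorem colB_length (rows : List (List Int)) (tot : List Int) :
    (rows.foldl (fun tot fila =>
      (PySem.List.enumerate tot).map (fun jt => jt.2 + PySem.List.pyGetD fila jt.1 0)) tot).length
    = tot.length := by
  induction rows generalizing tot with
  | nil => rfl
  | cons r rs ih => simp only [List.foldl_cons]; rw [ih, colStep_length]

theorem colB_get (rows : List (List Int)) (tot : List Int) (k : Nat) (hk : k < tot.length) :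
    (rows.foldl (fun tot fila =>
      (PySem.List.enumerate tot).map (fun jt => jt.2 + PySem.List.pyGetD fila jt.1 0)) tot)[k]'(by
        rw [colB_length]; exact hk)
    = tot[k] + Fcol rows (k : Int) := by
  induction rows generalizing tot with
  | nil => simp [Fcol]
  | cons r rs ih =>
    simp only [List.foldl_cons]
    rw [ih _ (by rw [colStep_length]; exact hk), colStep_get tot r k hk, Fcol_cons]
    ring

-- A's inner column loop equals Fcol
theorem colA_inner (matriz : List (List Int)) (j : Int) :
    (PySem.List.pyRange 0 (matriz.length : Int) 1).foldl
      (fun tc i => tc + PySem.List.pyGetD (PySem.List.pyGetD matriz i []) j 0) 0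
    = Fcol matriz j := by
  have := PySem.List.foldl_pyRange_zero_pyGetD matriz ([] : List Int)
    (fun tc r => tc + PySem.List.pyGetD r j 0) 0
  simpa [Fcol] using this

-- ===== VERDICT (by name: the statement is the Claim_ definition above) =====
theorem calcular_totales_spec : Claim_equal_calcular_totales := by
  intro matriz por_la_fila _hdom _hpre
  unfold Spec_calcular_totales calcular_totales calcular_totales_alt
  cases por_la_fila with
  | true => simpa using rowA_eq matriz []
  | false =>
    simp only [Bool.false_eq_true, if_false]
    set c : Nat := (PySem.List.pyGetD matriz 0 []).length with hc
    have hA : (PySem.List.pyRange 0 (c : Int) 1).foldl (fun totales j =>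
        totales ++ [(PySem.List.pyRange 0 (matriz.length : Int) 1).foldl
          (fun tc i => tc + PySem.List.pyGetD (PySem.List.pyGetD matriz i []) j 0) 0]) []
        = (PySem.List.pyRange 0 (c : Int) 1).map (fun j => Fcol matriz j) := by
      rw [PySem.List.foldl_append_singleton_eq_map]
      simp only [List.nil_append]
      exact List.map_congr_left (fun j _ => colA_inner matriz j)
    rw [hA]
    apply List.ext_getElem
    · rw [colB_length]
      simp [PySem.List.length_pyRange_one]
    · intro k h1 h2
      have hk : k < c := by
        simpa [PySem.List.length_pyRange_one] using h1
      rw [colB_get matriz (List.replicate c 0) k (by simpa using hk)]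
      rw [List.getElem_map, PySem.List.getElem_pyRange_one]
      simp
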